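-- pv_equiv track=rewrite | github.com/apdimier/Etumos | Python/species.py | _getCharge
-- ===== SOURCE A (Python) =====
-- from string import digits
--
-- def _getCharge(symbol):
--     """
--     extracting charge from  element description like Ca, Ca[], Ca(), Ca{}, Ca++, Ca[++], Ca[2+]
--
--     Ca2+ is not a correct expression
--     """
--     if "(" in symbol: symbol = symbol.replace("(","[").replace(")","]")
--     if "{" in symbol: symbol = symbol.replace("{","[").replace("}","]")
--     anal = symbol[-1]
--     charge = symbol[:-1]
--     if anal == ']':
--         charge = charge[symbol.index('['):]
--         if len(charge) > 1 and charge[1] in digits: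
--             # [2+]
--             return int(charge[1]) * _getCharge(charge)
--         else:
--             # [++]
--             return _getCharge(charge)
--     elif anal == '+':
--         return (1 + _getCharge(charge))
--     elif anal == '-':
--         return (-1 + _getCharge(charge))
--     else:
--         return 0
-- ===== SOURCE B (Python) =====
-- from string import digits
--
-- def _getCharge(symbol):
--     """Iterative right-to-left rewrite: one cursor loop with a running total and a
--     bracket multiplier instead of A's recursion (one recursive call per sign)."""
--     if "(" in symbol: symbol = symbol.replace("(","[").replace(")","]")
--     if "{" in symbol: symbol = symbol.replace("{","[").replace("}","]")
--     total, mult, cur = 0, 1, symbol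
--     while True:
--         i = len(cur) - 1
--         while i >= 0 and cur[i] in "+-":
--             total += mult if cur[i] == '+' else -mult
--             i -= 1
--         if i >= 0 and cur[i] == ']':
--             seg = cur[cur.index('['):i]
--             if len(seg) > 1 and seg[1] in digits:
--                 mult *= int(seg[1])
--             cur = seg
--         else:
--             return total
-- ===== Notes on version B (the rewrite author's own statement) =====
-- stated objective: alternative
-- what changed: Replaced A's recursion (one call per trailing sign plus re-entry into the bracket) by a single iterative right-to-left cursor loop that keeps a running total and a bracket multiplier.
-- crash fix: On strings that are empty or consist (after ()/{}-normalisation) only of '+'/'-' characters A raises IndexError when the recursion reaches the empty string; B's loop simply returns the signed count (e.g. 1 for '+'). — e.g. on _getCharge("+"): A raises IndexError, B returns 1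
import Mathlib
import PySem

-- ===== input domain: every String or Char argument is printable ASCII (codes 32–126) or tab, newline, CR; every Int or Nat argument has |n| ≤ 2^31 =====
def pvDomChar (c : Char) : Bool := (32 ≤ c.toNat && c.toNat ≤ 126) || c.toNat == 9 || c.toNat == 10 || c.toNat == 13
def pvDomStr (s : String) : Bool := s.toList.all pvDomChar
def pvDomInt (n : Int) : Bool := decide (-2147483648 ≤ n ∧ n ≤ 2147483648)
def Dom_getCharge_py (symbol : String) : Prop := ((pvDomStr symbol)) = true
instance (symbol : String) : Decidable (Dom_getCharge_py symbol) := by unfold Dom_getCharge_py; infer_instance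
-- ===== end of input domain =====

-- B replaces A's recursion by one iterative right-to-left cursor loop with a running total
-- and a bracket multiplier (objective: alternative; same O(n) cost).


-- ===== PORT A =====
-- symbol.replace("(","[").replace(")","]") as a character map (exact: both are single chars)
def pvParen (c : Char) : Char := if c = '(' then '[' else if c = ')' then ']' else c
def pvBrace (c : Char) : Char := if c = '{' then '[' else if c = '}' then ']' else c
-- the two conditional replace lines of both Pythons
def pvNorm (l : List Char) : List Char :=
  let l1 := if '(' ∈ l then l.map pvParen else l
  if '{' ∈ l1 then l1.map pvBrace else l1

theorem pvNorm_length (l : List Char) : (pvNorm l).length = l.length := by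
  unfold pvNorm; dsimp only; split <;> split <;> simp

-- A's recursive body on List Char; the two raise sites (symbol[-1] on "", index('[') with no
-- '[') return 0 here and are excluded by Pre_ (on [] the getLastD default ' ' also lands in
-- the final else-0 branch, so the marker value is the same 0).
def aGo (s : List Char) : Int :=
  let n := pvNorm s
  if n = [] then 0  -- IndexError: symbol[-1] on empty string
  else
    let anal := n.getLastD ' '
    let charge := n.dropLast
    if anal = ']' then
      if '[' ∈ n then
        let c := charge.drop (n.idxOf '[')
        if 1 < c.length ∧ (c.getD 1 ' ').isDigit then
          ((c.getD 1 ' ').toNat - ('0'.toNat) : Int) * aGo c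
        else aGo c
      else 0  -- ValueError: symbol.index('[')
    else if anal = '+' then 1 + aGo charge
    else if anal = '-' then -1 + aGo charge
    else 0
termination_by s.length
decreasing_by all_goals
  (have hn := pvNorm_length s
   have hpos : 0 < (pvNorm s).length := List.length_pos_iff.mpr (by assumption)
   simp only [List.length_drop, List.length_dropLast]
   omega)

def getCharge_py (symbol : String) : Int := aGo symbol.toList

-- ===== PORT B =====
-- B's outer while-loop; r is the still-unread part of cur REVERSED (the cursor walks right
-- to left), total/mult the running state.  cur[cur.index('['):i] = (t.drop (t.idxOf '[')).dropLast
-- where t is cur minus its consumed trailing-sign run: the consumed chars are all '+'/'-',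
-- so '[' occurs in cur iff in t, at the same index, and i is the position of the ']'.
def bLoop (r : List Char) (total mult : Int) : Int :=
  match r with
  | [] => total
  | c :: rest =>
    if c = '+' then bLoop rest (total + mult) mult
    else if c = '-' then bLoop rest (total - mult) mult
    else if c = ']' then
      let t := (c :: rest).reverse
      if '[' ∈ t then
        let seg := (t.drop (t.idxOf '[')).dropLast
        let mult' := if 1 < seg.length ∧ (seg.getD 1 ' ').isDigit then
            mult * ((seg.getD 1 ' ').toNat - ('0'.toNat) : Int) else mult
        bLoop seg.reverse total mult'
      else total  -- ValueError: cur.index('[')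
    else total
termination_by r.length
decreasing_by
  · simp
  · simp
  · simp only [List.length_reverse, List.length_dropLast, List.length_drop, List.length_cons]
    omega

def getCharge_py_alt (symbol : String) : Int := bLoop (pvNorm symbol.toList).reverse 0 1

-- ===== PRECONDITION & SPEC =====
def pvSign (c : Char) : Bool := c = '+' || c = '-'

-- Pre_ excludes exactly the inputs on which A raises: strings whose normalised form is all
-- '+'/'-' (possibly empty) — IndexError — and those ending (after stripping the trailing
-- sign run) in ']' with no '[' — ValueError.
def Pre_getCharge_py (symbol : String) : Prop :=
  let r := (pvNorm symbol.toList).reverse.dropWhile pvSign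
  r ≠ [] ∧ (r.headD ' ' = ']' → '[' ∈ r)
instance (symbol : String) : Decidable (Pre_getCharge_py symbol) := by unfold Pre_getCharge_py; infer_instance

def pvWitness_getCharge_py : String := "Ca[2+]"

-- On strings that are empty or consist (after ()/{}-normalisation) only of '+'/'-' characters
-- A raises IndexError when the recursion reaches the empty string; B's loop returns the signed count.
def Raises_getCharge_py (symbol : String) : Prop :=
  (pvNorm symbol.toList).all pvSign = true
instance (symbol : String) : Decidable (Raises_getCharge_py symbol) := by unfold Raises_getCharge_py; infer_instance
def pvRaiseWitness_getCharge_py : String := "+"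
def pvRaiseWitnessOut_getCharge_py : Int := 1

def Spec_getCharge_py (symbol : String) (out : Int) : Prop := out = getCharge_py_alt symbol
instance (symbol : String) (out : Int) : Decidable (Spec_getCharge_py symbol out) := by unfold Spec_getCharge_py; infer_instance

-- ===== CLAIM (what is proved, stated in full; the proofs are below) =====
def Claim_equal_getCharge_py : Prop := ∀ (symbol : String), Dom_getCharge_py symbol → Pre_getCharge_py symbol → Spec_getCharge_py symbol (getCharge_py symbol)
def Claim_raises_getCharge_py : Prop := (∀ (symbol : String), Dom_getCharge_py symbol → Raises_getCharge_py symbol → ¬ Pre_getCharge_py symbol) ∧ (Dom_getCharge_py (pvRaiseWitness_getCharge_py) ∧ Raises_getCharge_py (pvRaiseWitness_getCharge_py) ∧ getCharge_py_alt (pvRaiseWitness_getCharge_py) = pvRaiseWitnessOut_getCharge_py)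

-- ===== LEMMAS AND PROOFS =====

theorem pvParen_ne (a : Char) : ¬ pvParen a = '(' := by
  unfold pvParen; split_ifs with h1 h2 <;> first | decide | exact h1

theorem pvBrace_ne_paren (a : Char) (h : ¬ a = '(') : ¬ pvBrace a = '(' := by
  unfold pvBrace; split_ifs <;> first | decide | exact h

theorem pvBrace_ne_brace (a : Char) : ¬ pvBrace a = '{' := by
  unfold pvBrace; split_ifs with h1 h2 <;> first | decide | exact h1

theorem pvNorm_no_paren (l : List Char) : '(' ∉ pvNorm l ∧ '{' ∉ pvNorm l := by
  have key : ∀ m : List Char, '(' ∉ m →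
      '(' ∉ (if '{' ∈ m then m.map pvBrace else m) ∧
      '{' ∉ (if '{' ∈ m then m.map pvBrace else m) := by
    intro m hm
    split
    · constructor
      · intro hx; rcases List.mem_map.mp hx with ⟨a, haa, ha⟩
        exact pvBrace_ne_paren a (fun h => hm (h ▸ haa)) ha
      · intro hx; rcases List.mem_map.mp hx with ⟨a, _, ha⟩
        exact pvBrace_ne_brace a ha
    · exact ⟨hm, by assumption⟩
  have h1 : '(' ∉ (if '(' ∈ l then l.map pvParen else l) := by
    split
    · intro hx; rcases List.mem_map.mp hx with ⟨a, _, ha⟩; exact pvParen_ne a ha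
    · assumption
  unfold pvNorm
  exact key _ h1

theorem pvNorm_eq_self {l : List Char} (h1 : '(' ∉ l) (h2 : '{' ∉ l) : pvNorm l = l := by
  unfold pvNorm; simp [h1, h2]

theorem mem_dropWhile_of_neg {p : Char → Bool} {a : Char} {l : List Char}
    (hm : a ∈ l) (hp : p a = false) : a ∈ l.dropWhile p := by
  induction l with
  | nil => simp at hm
  | cons b t ih =>
    rcases List.mem_cons.mp hm with h | h
    · subst h; simp [hp]
    · rw [List.dropWhile_cons]; split
      · exact ih h
      · exact List.mem_cons_of_mem _ h

theorem pvDropLast_drop (l : List Char) (i : Nat) : (l.dropLast).drop i = (l.drop i).dropLast := by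
  rw [List.dropLast_eq_take, List.dropLast_eq_take, List.drop_take, List.length_drop]
  congr 1
  omega

-- one-step unfolding of aGo on a clean nonempty string
theorem aGo_eq (s : List Char) (c : Char) (hp : '(' ∉ s) (hbr : '{' ∉ s)
    (hne : s ≠ []) (hlastd : s.getLastD ' ' = c) :
    aGo s =
      (if c = ']' then
        (if '[' ∈ s then
          (if 1 < ((s.dropLast).drop (s.idxOf '[')).length ∧
               (((s.dropLast).drop (s.idxOf '[')).getD 1 ' ').isDigit then
             ((((s.dropLast).drop (s.idxOf '[')).getD 1 ' ').toNat - ('0'.toNat) : Int) *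
               aGo ((s.dropLast).drop (s.idxOf '['))
           else aGo ((s.dropLast).drop (s.idxOf '[')))
        else 0)
      else if c = '+' then 1 + aGo s.dropLast
      else if c = '-' then -1 + aGo s.dropLast
      else 0) := by
  conv_lhs => rw [aGo.eq_def]
  simp only [pvNorm_eq_self hp hbr, hlastd]
  rw [if_neg hne]

-- main invariant: on a clean (already normalised) string satisfying the safety condition,
-- B's loop computes total + mult * (A's recursive value).
theorem pvMain : ∀ (fuel : Nat) (s : List Char), s.length ≤ fuel → '(' ∉ s → '{' ∉ s →
    (s.reverse.dropWhile pvSign ≠ [] ∧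
      ((s.reverse.dropWhile pvSign).headD ' ' = ']' → '[' ∈ s.reverse.dropWhile pvSign)) →
    ∀ total mult : Int, bLoop s.reverse total mult = total + mult * aGo s := by
  intro fuel
  induction fuel with
  | zero =>
    intro s hlen _ _ hsafe _ _
    have hnil : s = [] := List.length_eq_zero_iff.mp (Nat.le_zero.mp hlen)
    subst hnil; simp at hsafe
  | succ fuel ih =>
    intro s hlen hp hbr hsafe total mult
    obtain ⟨hne, hhead⟩ := hsafe
    cases hr : s.reverse with
    | nil => rw [hr] at hne; simp at hne
    | cons c rest =>
      have hs : s = rest.reverse ++ [c] := by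
        have h := congrArg List.reverse hr
        simpa using h
      have hdl : s.dropLast = rest.reverse := by rw [hs]; simp
      have hnil : s ≠ [] := by rw [hs]; simp
      have hlast : s.getLastD ' ' = c := by rw [hs]; exact List.getLastD_concat
      have hlen' : rest.length + 1 = s.length := by rw [hs]; simp
      have hArec := aGo_eq s c hp hbr hnil hlast
      rw [bLoop]
      by_cases hpl : c = '+'
      · subst hpl
        rw [if_pos rfl, hArec, if_neg (by decide : ¬('+' : Char) = ']'), if_pos rfl]
        rw [hr, List.dropWhile_cons, if_pos (by decide : pvSign '+' = true)] at hne hhead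
        have hih := ih s.dropLast (by rw [hdl]; simp only [List.length_reverse]; omega)
          (fun h => hp (List.mem_of_mem_dropLast h))
          (fun h => hbr (List.mem_of_mem_dropLast h))
          (by rw [hdl]; simp only [List.reverse_reverse]; exact ⟨hne, hhead⟩)
          (total + mult) mult
        rw [hdl, List.reverse_reverse] at hih
        rw [hih, hdl]; ring
      · by_cases hmi : c = '-'
        · subst hmi
          rw [if_neg (by decide : ¬('-' : Char) = '+'), if_pos rfl, hArec,
            if_neg (by decide : ¬('-' : Char) = ']'), if_neg (by decide : ¬('-' : Char) = '+'),
            if_pos rfl]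
          rw [hr, List.dropWhile_cons, if_pos (by decide : pvSign '-' = true)] at hne hhead
          have hih := ih s.dropLast (by rw [hdl]; simp only [List.length_reverse]; omega)
            (fun h => hp (List.mem_of_mem_dropLast h))
            (fun h => hbr (List.mem_of_mem_dropLast h))
            (by rw [hdl]; simp only [List.reverse_reverse]; exact ⟨hne, hhead⟩)
            (total - mult) mult
          rw [hdl, List.reverse_reverse] at hih
          rw [hih, hdl]; ring
        · by_cases hbk : c = ']'
          · subst hbk
            rw [if_neg (by decide : ¬(']' : Char) = '+'),
              if_neg (by decide : ¬(']' : Char) = '-'), if_pos rfl]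
            rw [hr, List.dropWhile_cons, if_neg (by decide : ¬pvSign ']' = true)] at hhead
            have hmemrev : '[' ∈ (']' :: rest) := hhead (by simp)
            have hmem : '[' ∈ s := List.mem_reverse.mp (hr ▸ hmemrev)
            have ht : (']' :: rest).reverse = s := by
              simp only [List.reverse_cons]; rw [← hs]
            rw [hArec, if_pos rfl, if_pos hmem]
            simp only [ht, if_pos hmem]
            rw [pvDropLast_drop]
            -- facts about seg := (s.drop idx).dropLast
            have hidx : s.idxOf '[' < s.length := List.idxOf_lt_length_of_mem hmem
            have hgetidx : s[s.idxOf '[']'hidx = '[' := List.getElem_idxOf hidx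
            have hslen : 0 < s.length := by omega
            have hlastget? : s[s.length - 1]? = some ']' := by
              have h : (rest.reverse ++ [']'])[rest.reverse.length]? = some ']' :=
                List.getElem?_concat_length
              rw [← hs] at h
              have hlr : rest.reverse.length = s.length - 1 := by simp; omega
              rw [hlr] at h
              exact h
            have hidx2 : s.idxOf '[' < s.length - 1 := by
              rcases Nat.lt_or_ge (s.idxOf '[') (s.length - 1) with h | h
              · exact h
              · exfalso
                have heq : s.idxOf '[' = s.length - 1 := by omega
                have hgi? : s[s.idxOf '[']? = some '[' := by
                  rw [List.getElem?_eq_getElem hidx, hgetidx]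
                rw [heq, hlastget?] at hgi?
                exact absurd hgi? (by decide)
            have hseglen : ((s.drop (s.idxOf '[')).dropLast).length
                = s.length - s.idxOf '[' - 1 := by simp
            have hseg0 : ((s.drop (s.idxOf '[')).dropLast)[0]'(by rw [hseglen]; omega)
                = '[' := by
              rw [List.getElem_dropLast, List.getElem_drop]
              simpa using hgetidx
            have hsegmem : '[' ∈ (s.drop (s.idxOf '[')).dropLast :=
              List.mem_iff_getElem.mpr ⟨0, by rw [hseglen]; omega, hseg0⟩
            have hsegsafe : '[' ∈ ((s.drop (s.idxOf '[')).dropLast).reverse.dropWhile pvSign :=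
              mem_dropWhile_of_neg (List.mem_reverse.mpr hsegmem) (by decide)
            have hclean : ∀ a, a ∈ (s.drop (s.idxOf '[')).dropLast → a ∈ s :=
              fun a h => List.mem_of_mem_drop (List.mem_of_mem_dropLast h)
            have hih := fun m => ih ((s.drop (s.idxOf '[')).dropLast)
              (by rw [hseglen]; omega)
              (fun h => hp (hclean _ h))
              (fun h => hbr (hclean _ h))
              ⟨List.ne_nil_of_mem hsegsafe, fun _ => hsegsafe⟩
              total m
            by_cases hP : 1 < ((s.drop (s.idxOf '[')).dropLast).length ∧
                (((s.drop (s.idxOf '[')).dropLast).getD 1 ' ').isDigit = true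
            · rw [if_pos hP, if_pos hP, hih]; try ring
            · rw [if_neg hP, if_neg hP, hih]; try ring
          · rw [if_neg hpl, if_neg hmi, if_neg hbk, hArec,
              if_neg hbk, if_neg hpl, if_neg hmi]
            ring

theorem aGo_norm (l : List Char) : aGo l = aGo (pvNorm l) := by
  have h := pvNorm_no_paren l
  conv_lhs => rw [aGo.eq_def]
  conv_rhs => rw [aGo.eq_def]
  rw [pvNorm_eq_self h.1 h.2]

-- ===== VERDICT (by name: the statement is the Claim_ definition above) =====
theorem getCharge_py_spec : Claim_equal_getCharge_py := by
  intro symbol _ hpre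
  unfold Spec_getCharge_py getCharge_py getCharge_py_alt
  unfold Pre_getCharge_py at hpre
  have hclean := pvNorm_no_paren symbol.toList
  have h := pvMain (pvNorm symbol.toList).length (pvNorm symbol.toList) le_rfl
    hclean.1 hclean.2 hpre 0 1
  rw [aGo_norm, h]; ring

set_option maxRecDepth 10000 in
theorem getCharge_py_raises : Claim_raises_getCharge_py := by
  unfold Claim_raises_getCharge_py
  refine ⟨?_, by decide, by decide, ?wit⟩
  case wit =>
    show bLoop (pvNorm "+".toList).reverse 0 1 = 1
    rw [show pvNorm "+".toList = ['+'] by decide]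
    rw [show (['+'] : List Char).reverse = ['+'] by decide]
    rw [bLoop, if_pos rfl, bLoop]
    norm_num
  intro symbol _ hra hpre
  unfold Pre_getCharge_py at hpre
  unfold Raises_getCharge_py at hra
  exact hpre.1 (List.dropWhile_eq_nil_iff.mpr
    (fun x hx => List.all_eq_true.mp hra x (List.mem_reverse.mp hx)))

-- self-check: the raise witness indeed lies outside Pre_ (A raises there, B returns 1)
theorem pvRaiseWitness_ok : ¬ Pre_getCharge_py pvRaiseWitness_getCharge_py :=
  getCharge_py_raises.1 pvRaiseWitness_getCharge_py (by decide) getCharge_py_raises.2.2.1
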